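-- pv_equiv track=rewrite | github.com/flybird111/PSux | quick_commands/window.py | summarize_command
-- ===== SOURCE A (Python) =====
-- from typing import Any, Dict, List, Optional, Tuple, TYPE_CHECKING
--
-- def summarize_command(command_text: str, index: int) -> Tuple[str, str]:
--     lines = command_text.replace("\r\n", "\n").replace("\r", "\n").split("\n")
--     description: Optional[str] = None
--     command_line: Optional[str] = None
--
--     for raw_line in lines:
--         stripped = raw_line.strip()
--         if not stripped:
--             continue
--         if stripped.startswith("#") and description is None:
--             description = stripped.lstrip("#").strip()
--             continue
--         command_line = stripped
--         break
--
--     if command_line is None: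
--         command_line = ""
--     if description:
--         left = f"#{index} {description}".strip()
--     else:
--         left = f"#{index}"
--     return left, command_line
-- ===== SOURCE B (Python) =====
-- def summarize_command(command_text: str, index: int):
--     # Single forward character scan: no replace()/split(); lines are flushed at
--     # each '\n' or '\r' ('\r\n' just adds an empty flush, which is skipped),
--     # keeping only the first two non-blank stripped lines.
--     first = None
--     second = None
--     buf = []
--     for c in command_text + "\n":
--         if c == "\n" or c == "\r":
--             s = "".join(buf).strip()
--             buf = []
--             if s:
--                 if first is None:
--                     first = s
--                 elif second is None:
--                     second = s
--         else:
--             buf.append(c)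
--     if first is not None and first.startswith("#"):
--         description = first.lstrip("#").strip()
--         command_line = second if second is not None else ""
--     else:
--         description = None
--         command_line = first if first is not None else ""
--     if description:
--         left = f"#{index} {description}".strip()
--     else:
--         left = f"#{index}"
--     return left, command_line
-- ===== Notes on version B (the rewrite author's own statement) =====
-- stated objective: alternative
-- what changed: Replaces A's replace/replace/split string pipeline plus a stateful break/continue loop over the line list by a single character-level scan of command_text that flushes a line buffer at each newline/CR and retains only the first two non-blank stripped lines, never materializing the line list.
import Mathlib
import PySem

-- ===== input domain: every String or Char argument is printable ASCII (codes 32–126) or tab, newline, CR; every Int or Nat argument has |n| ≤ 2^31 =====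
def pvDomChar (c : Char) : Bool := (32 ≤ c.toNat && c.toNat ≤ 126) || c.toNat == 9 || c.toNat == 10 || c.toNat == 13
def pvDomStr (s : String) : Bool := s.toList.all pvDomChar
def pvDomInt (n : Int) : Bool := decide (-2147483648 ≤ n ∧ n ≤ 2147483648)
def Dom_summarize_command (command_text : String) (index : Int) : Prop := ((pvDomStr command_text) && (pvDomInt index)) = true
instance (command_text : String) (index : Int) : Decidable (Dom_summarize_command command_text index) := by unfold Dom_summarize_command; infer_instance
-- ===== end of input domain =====

-- B replaces A's replace/replace/split line pipeline plus a stateful break/continue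
-- loop over lines by a single character-level scan that flushes a line buffer at each
-- '\n'/'\r' and keeps only the first two non-blank stripped lines (objective: alternative).


-- ===== PORT A =====
-- s.lstrip('#') (drop leading '#' characters); exact
def pvLstripHash (s : String) : String := String.ofList (s.toList.dropWhile (· == '#'))

def pvLines (t : String) : List String :=
  (PySem.Str.split? (PySem.Str.replace (PySem.Str.replace t "\r\n" "\n") "\r" "\n") "\n").getD []

def pvLoopA : List String → Option String → Option String × Option String
  | [], d => (d, none)
  | l :: rest, d =>
    let s := PySem.Str.strip l
    if s = "" then pvLoopA rest d
    else if PySem.Str.startswith s "#" && d.isNone then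
      pvLoopA rest (some (PySem.Str.strip (pvLstripHash s)))
    else (d, some s)

def summarize_command (command_text : String) (index : Int) : String × String :=
  let lines := pvLines command_text
  let r := pvLoopA lines none
  let description := r.1
  let command_line := (r.2).getD ""
  let left :=
    if description.getD "" ≠ "" then
      PySem.Str.strip ("#" ++ PySem.Int.toStr index ++ " " ++ description.getD "")
    else "#" ++ PySem.Int.toStr index
  (left, command_line)

-- ===== PORT B =====
-- the for-loop over command_text + "\n": flush the buffer at '\n'/'\r', keep first two non-blank stripped lines
def scanB : List Char → List Char → Option (List Char) → Option (List Char) →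
    Option (List Char) × Option (List Char)
  | [], _, f, s => (f, s)
  | c :: rest, buf, f, s =>
    if c = '\n' ∨ c = '\r' then
      let st := PySem.Chars.strip buf
      if st = [] then scanB rest [] f s
      else
        match f, s with
        | none, s' => scanB rest [] (some st) s'
        | some f', none => scanB rest [] (some f') (some st)
        | some f', some s' => scanB rest [] (some f') (some s')
    else scanB rest (buf ++ [c]) f s

def summarize_command_alt (command_text : String) (index : Int) : String × String :=
  let r := scanB (command_text.toList ++ ['\n']) [] none none
  let dc : Option (List Char) × List Char :=
    match r.1 with
    | some f =>
      if PySem.Chars.startswith f ['#'] then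
        (some (PySem.Chars.strip (f.dropWhile (· == '#'))), (r.2).getD [])
      else (none, f)
    | none => (none, [])
  let left :=
    if (dc.1.getD []) ≠ [] then
      PySem.Str.strip ("#" ++ PySem.Int.toStr index ++ " " ++ String.ofList (dc.1.getD []))
    else "#" ++ PySem.Int.toStr index
  (left, String.ofList dc.2)

-- ===== PRECONDITION & SPEC =====
def Spec_summarize_command (command_text : String) (index : Int) (out : String × String) : Prop := out = summarize_command_alt command_text index
instance (command_text : String) (index : Int) (out : String × String) : Decidable (Spec_summarize_command command_text index out) := by unfold Spec_summarize_command; infer_instance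

-- ===== CLAIM (what is proved, stated in full; the proofs are below) =====
def Claim_equal_summarize_command : Prop := ∀ (command_text : String) (index : Int), Dom_summarize_command command_text index → Spec_summarize_command command_text index (summarize_command command_text index)

-- ===== LEMMAS AND PROOFS =====
def repl1 : List Char → List Char
  | [] => []
  | '\r' :: '\n' :: t => '\n' :: repl1 t
  | c :: t => c :: repl1 t

theorem repl1_cons_of_not (c : Char) (t : List Char)
    (h : ¬ (c = '\r' ∧ t.head? = some '\n')) : repl1 (c :: t) = c :: repl1 t := by
  rw [repl1.eq_def]
  split
  · rename_i heq; cases heq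
  · rename_i heq; injection heq with h1 h2; subst h1; subst h2; simp at h
  · rename_i heq; injection heq with h1 h2; subst h1; subst h2; rfl

theorem isPrefixOf_rn_iff (l : List Char) :
    List.isPrefixOf ['\r','\n'] l = true ↔ ∃ t, l = '\r' :: '\n' :: t := by
  constructor
  · intro h
    cases l with
    | nil => simp [List.isPrefixOf] at h
    | cons c t =>
      cases t with
      | nil => simp [List.isPrefixOf] at h
      | cons d t' =>
        simp [List.isPrefixOf] at h
        exact ⟨t', by rw [← h.1, ← h.2]⟩
  · rintro ⟨t, rfl⟩; simp [List.isPrefixOf]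

theorem go_rn (fuel : Nat) : ∀ (l acc : List Char), l.length ≤ fuel →
    PySem.Chars.replace.go ['\r','\n'] ['\n'] fuel l acc = acc.reverse ++ repl1 l := by
  induction fuel with
  | zero =>
    intro l acc h
    have : l = [] := by cases l <;> simp_all
    subst this; simp [PySem.Chars.replace.go, repl1]
  | succ n ih =>
    intro l acc h
    cases l with
    | nil => simp [PySem.Chars.replace.go, repl1]
    | cons c t =>
      rw [PySem.Chars.replace.go]
      by_cases hp : List.isPrefixOf ['\r','\n'] (c :: t) = true
      · obtain ⟨t', ht⟩ := (isPrefixOf_rn_iff _).1 hp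
        simp only [hp, if_pos]
        injection ht with h1 h2; subst h1; subst h2
        simp only [List.length_cons] at h
        rw [show List.drop (['\r','\n'].length) ('\r'::'\n'::t') = t' by simp]
        rw [ih t' _ (by omega)]
        simp [repl1]
      · simp only [hp, if_neg, Bool.false_eq_true, not_false_iff]
        simp only [List.length_cons] at h
        rw [ih t _ (by omega)]
        rw [repl1_cons_of_not]
        · simp
        · intro ⟨h1, h2⟩; subst h1
          cases t with
          | nil => simp at h2
          | cons d t'' => simp at h2; subst h2; simp [List.isPrefixOf] at hp

-- replace with single-char old = map
theorem go_r (fuel : Nat) : ∀ (l acc : List Char), l.length ≤ fuel →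
    PySem.Chars.replace.go ['\r'] ['\n'] fuel l acc =
      acc.reverse ++ l.map (fun c => if c = '\r' then '\n' else c) := by
  induction fuel with
  | zero =>
    intro l acc h
    have : l = [] := by cases l <;> simp_all
    subst this; simp [PySem.Chars.replace.go]
  | succ n ih =>
    intro l acc h
    cases l with
    | nil => simp [PySem.Chars.replace.go]
    | cons c t =>
      rw [PySem.Chars.replace.go]
      simp only [List.length_cons] at h
      by_cases hc : c = '\r'
      · subst hc
        have hp : List.isPrefixOf ['\r'] ('\r' :: t) = true := by simp [List.isPrefixOf]
        simp only [hp, if_pos]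
        rw [show List.drop (['\r'].length) ('\r'::t) = t by simp]
        rw [ih t _ (by omega)]
        simp
      · have hp : List.isPrefixOf ['\r'] (c :: t) = false := by
          simp [List.isPrefixOf]; exact fun h => absurd h.symm hc
        simp only [hp, Bool.false_eq_true, not_false_iff, if_neg]
        rw [ih t _ (by omega)]
        simp [hc]

theorem replace_rn (cs : List Char) :
    PySem.Chars.replace cs ['\r','\n'] ['\n'] = repl1 cs := by
  rw [PySem.Chars.replace]
  simp only [List.isEmpty_cons, Bool.false_eq_true, not_false_iff, if_neg]
  exact go_rn cs.length cs [] (le_refl _)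

theorem replace_r (cs : List Char) :
    PySem.Chars.replace cs ['\r'] ['\n'] = cs.map (fun c => if c = '\r' then '\n' else c) := by
  rw [PySem.Chars.replace]
  simp only [List.isEmpty_cons, Bool.false_eq_true, not_false_iff, if_neg]
  exact go_r cs.length cs [] (le_refl _)

def normAll : List Char → List Char
  | [] => []
  | '\r' :: '\n' :: t => '\n' :: normAll t
  | c :: t => (if c = '\r' then '\n' else c) :: normAll t

theorem map_repl1 (cs : List Char) :
    (repl1 cs).map (fun c => if c = '\r' then '\n' else c) = normAll cs := by
  induction cs using repl1.induct with
  | case1 => simp [repl1, normAll]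
  | case2 t ih => simp only [repl1, normAll, List.map_cons, ih]; norm_num
  | case3 c t h ih =>
    have hnot : ¬ (c = '\r' ∧ t.head? = some '\n') := by
      intro ⟨h1, h2⟩
      cases t with
      | nil => simp at h2
      | cons d t' =>
        simp at h2
        exact h t' h1 (by rw [h2])
    rw [repl1_cons_of_not c t hnot]
    rw [normAll.eq_def]
    split
    · rename_i heq; cases heq
    · rename_i heq
      injection heq with h1 h2; subst h1; subst h2
      exact absurd ⟨rfl, rfl⟩ hnot
    · rename_i heq
      injection heq with h1 h2; subst h1; subst h2
      simp [ih]

def splitN : List Char → List Char × List (List Char)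
  | [] => ([], [])
  | c :: t =>
    if c = '\n' then ([], (splitN t).1 :: (splitN t).2)
    else (c :: (splitN t).1, (splitN t).2)

def splitRN : List Char → List Char × List (List Char)
  | [] => ([], [])
  | c :: t =>
    if c = '\n' ∨ c = '\r' then ([], (splitRN t).1 :: (splitRN t).2)
    else (c :: (splitRN t).1, (splitRN t).2)

theorem go_split (fuel : Nat) : ∀ (l cur : List Char) (acc : List (List Char)), l.length < fuel →
    PySem.Chars.splitOn.go ['\n'] fuel l cur acc =
      acc.reverse ++ ((cur.reverse ++ (splitN l).1) :: (splitN l).2) := by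
  induction fuel with
  | zero => intro l cur acc h; omega
  | succ n ih =>
    intro l cur acc h
    cases l with
    | nil => simp [PySem.Chars.splitOn.go, splitN]
    | cons c t =>
      rw [PySem.Chars.splitOn.go]
      simp only [List.length_cons] at h
      by_cases hc : c = '\n'
      · subst hc
        have hp : List.isPrefixOf ['\n'] ('\n' :: t) = true := by simp [List.isPrefixOf]
        simp only [hp, if_pos]
        rw [show List.drop (['\n'].length) ('\n'::t) = t by simp]
        rw [ih t [] _ (by omega)]
        simp [splitN]
      · have hp : List.isPrefixOf ['\n'] (c :: t) = false := by
          simp [List.isPrefixOf]; exact fun h => absurd h.symm hc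
        simp only [hp, Bool.false_eq_true, not_false_iff, if_neg]
        rw [ih t (c :: cur) acc (by omega)]
        simp [splitN, hc]

theorem splitOn_n (ds : List Char) :
    PySem.Chars.splitOn ds ['\n'] = (splitN ds).1 :: (splitN ds).2 := by
  rw [PySem.Chars.splitOn]
  rw [go_split (ds.length + 1) ds [] [] (by omega)]
  simp

def NEsegs (l : List (List Char)) : List (List Char) :=
  l.filterMap (fun seg => if PySem.Chars.strip seg = [] then none else some (PySem.Chars.strip seg))

theorem NEsegs_cons (a : List Char) (X : List (List Char)) :
    NEsegs (a :: X) = if PySem.Chars.strip a = [] then NEsegs X else PySem.Chars.strip a :: NEsegs X := by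
  simp only [NEsegs, List.filterMap_cons]
  by_cases hs : PySem.Chars.strip a = [] <;> simp [hs]

theorem splitN_cons (c : Char) (t : List Char) :
    splitN (c :: t) = if c = '\n' then ([], (splitN t).1 :: (splitN t).2)
      else (c :: (splitN t).1, (splitN t).2) := rfl

theorem splitRN_cons (c : Char) (t : List Char) :
    splitRN (c :: t) = if c = '\n' ∨ c = '\r' then ([], (splitRN t).1 :: (splitRN t).2)
      else (c :: (splitRN t).1, (splitRN t).2) := rfl

theorem normAll_rn (t : List Char) : normAll ('\r' :: '\n' :: t) = '\n' :: normAll t := rfl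

theorem normAll_cons (c : Char) (t : List Char) (h : ¬ (c = '\r' ∧ t.head? = some '\n')) :
    normAll (c :: t) = (if c = '\r' then '\n' else c) :: normAll t := by
  rw [normAll.eq_def]
  split
  · rename_i heq; cases heq
  · rename_i heq
    injection heq with h1 h2; subst h1; subst h2
    exact absurd ⟨rfl, rfl⟩ h
  · rename_i heq; injection heq with h1 h2; subst h1; subst h2; rfl

theorem segs_rel (cs : List Char) :
    (splitN (normAll cs)).1 = (splitRN cs).1 ∧
    NEsegs ((splitN (normAll cs)).2) = NEsegs ((splitRN cs).2) := by
  induction cs using normAll.induct with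
  | case1 => simp [normAll, splitN, splitRN]
  | case2 t ih =>
    rw [normAll_rn, splitN_cons, splitRN_cons, splitRN_cons]
    norm_num
    rw [NEsegs_cons, NEsegs_cons, NEsegs_cons, ih.1]
    simp [ih.2, PySem.Chars.strip, PySem.Chars.lstrip, PySem.Chars.rstrip]
  | case3 c t h ih =>
    have hnot : ¬ (c = '\r' ∧ t.head? = some '\n') := by
      intro ⟨h1, h2⟩
      cases t with
      | nil => simp at h2
      | cons d t' => simp at h2; exact h t' h1 (by rw [h2])
    rw [normAll_cons c t hnot]
    by_cases hbrk : c = '\n' ∨ c = '\r'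
    · have hx : (if c = '\r' then '\n' else c) = '\n' := by
        rcases hbrk with h1 | h1 <;> simp [h1]
      rw [hx, splitN_cons, splitRN_cons, if_pos rfl, if_pos hbrk]
      norm_num
      rw [NEsegs_cons, NEsegs_cons, ih.1]
      by_cases hs : PySem.Chars.strip ((splitRN t).1) = [] <;> simp [hs, ih.2]
    · have hc : ¬ c = '\r' := fun hh => hbrk (Or.inr hh)
      have hn : ¬ c = '\n' := fun hh => hbrk (Or.inl hh)
      rw [if_neg hc, splitN_cons, splitRN_cons, if_neg hn, if_neg hbrk]
      exact ⟨by rw [ih.1], ih.2⟩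

theorem splitRN_append_nobreak (buf : List Char) (cs : List Char)
    (h : ∀ c ∈ buf, ¬ (c = '\n' ∨ c = '\r')) :
    splitRN (buf ++ cs) = (buf ++ (splitRN cs).1, (splitRN cs).2) := by
  induction buf with
  | nil => simp
  | cons b bt ih =>
    have hb := h b (by simp)
    rw [List.cons_append, splitRN_cons, if_neg hb, ih (fun c hc => h c (by simp [hc]))]
    simp

theorem splitRN_append_newline (cs : List Char) :
    (splitRN (cs ++ ['\n'])).1 :: (splitRN (cs ++ ['\n'])).2
      = ((splitRN cs).1 :: (splitRN cs).2) ++ [[]] := by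
  induction cs with
  | nil => simp [splitRN, splitRN_cons]
  | cons c t ih =>
    rw [List.cons_append, splitRN_cons, splitRN_cons]
    by_cases hb : c = '\n' ∨ c = '\r'
    · simp only [if_pos hb]
      simp only [List.cons_append]
      rw [ih]
      simp
    · simp only [if_neg hb]
      have h1 : (splitRN (t ++ ['\n'])).1 = (splitRN t).1 := by
        have := congrArg List.head? ih; simpa using this
      have h2 : (splitRN (t ++ ['\n'])).2 = (splitRN t).2 ++ [[]] := by
        have := congrArg List.tail ih; simpa using this
      simp [h1, h2]

def fill : Option (List Char) → Option (List Char) → List (List Char) →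
    Option (List Char) × Option (List Char)
  | f, s, [] => (f, s)
  | none, s, x :: r => fill (some x) s r
  | some f, none, _x :: r => fill (some f) (some _x) r
  | some f, some s, _ :: _ => (some f, some s)

theorem fill_none (s : Option (List Char)) (x : List Char) (r : List (List Char)) :
    fill none s (x :: r) = fill (some x) s r := by cases s <;> rfl

theorem fill_sn (f x : List Char) (r : List (List Char)) :
    fill (some f) none (x :: r) = fill (some f) (some x) r := rfl

theorem fill_full (a b : List Char) (l : List (List Char)) :
    fill (some a) (some b) l = (some a, some b) := by
  cases l <;> rfl

theorem scanB_full (cs : List Char) : ∀ (buf : List Char) (a b : List Char),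
    scanB cs buf (some a) (some b) = (some a, some b) := by
  induction cs with
  | nil => intro buf a b; rfl
  | cons c rest ih =>
    intro buf a b
    rw [scanB]
    by_cases hb : c = '\n' ∨ c = '\r'
    · simp only [if_pos hb]
      by_cases hs : PySem.Chars.strip buf = [] <;> simp [hs, ih]
    · simp only [if_neg hb]; exact ih _ a b

theorem scanB_eq (cs : List Char) : ∀ (buf : List Char) (f s : Option (List Char)),
    (∀ c ∈ buf, ¬ (c = '\n' ∨ c = '\r')) →
    scanB cs buf f s =
      fill f s (NEsegs (((splitRN (buf ++ cs)).1 :: (splitRN (buf ++ cs)).2).dropLast)) := by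
  induction cs with
  | nil =>
    intro buf f s h
    rw [splitRN_append_nobreak buf [] h]
    simp [scanB, NEsegs, fill, splitRN]
  | cons c rest ih =>
    intro buf f s h
    rw [scanB]
    by_cases hb : c = '\n' ∨ c = '\r'
    · simp only [if_pos hb]
      have hseg : ((splitRN (buf ++ c :: rest)).1 :: (splitRN (buf ++ c :: rest)).2).dropLast
          = buf :: ((splitRN rest).1 :: (splitRN rest).2).dropLast := by
        rw [splitRN_append_nobreak buf (c :: rest) h, splitRN_cons, if_pos hb]
        simp
      rw [hseg, NEsegs_cons]
      by_cases hs : PySem.Chars.strip buf = []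
      · rw [if_pos hs, if_pos hs]
        have := ih [] f s (by simp)
        simpa using this
      · rw [if_neg hs, if_neg hs]
        cases f with
        | none =>
          rw [fill_none]
          have := ih [] (some (PySem.Chars.strip buf)) s (by simp)
          simpa using this
        | some f' =>
          cases s with
          | none =>
            rw [fill_sn]
            have := ih [] (some f') (some (PySem.Chars.strip buf)) (by simp)
            simpa using this
          | some s' =>
            rw [fill_full]
            exact scanB_full rest [] f' s'
    · simp only [if_neg hb]
      have := ih (buf ++ [c]) f s (by
        intro d hd
        rcases List.mem_append.1 hd with h1 | h1
        · exact h d h1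
        · simp at h1; subst h1; exact hb)
      rw [this, List.append_assoc]
      simp

def pvNonempty (lines : List String) : List String :=
  lines.filterMap (fun l => let s := PySem.Str.strip l; if s = "" then none else some s)

-- A's loop: once description is set it returns it with the next nonempty stripped line
theorem pvLoopA_some (ls : List String) (x : String) :
    pvLoopA ls (some x) = (some x, (pvNonempty ls).head?) := by
  induction ls with
  | nil => simp [pvLoopA, pvNonempty]
  | cons l rest ih =>
    simp only [pvLoopA, pvNonempty, List.filterMap_cons]
    by_cases h : PySem.Str.strip l = "" <;> simp [h, ih, pvNonempty]

theorem pvLoopA_none (ls : List String) :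
    pvLoopA ls none =
      match pvNonempty ls with
      | [] => (none, none)
      | h :: t =>
        if PySem.Str.startswith h "#" then
          (some (PySem.Str.strip (pvLstripHash h)), t.head?)
        else (none, some h) := by
  induction ls with
  | nil => simp [pvLoopA, pvNonempty]
  | cons l rest ih =>
    simp only [pvLoopA, pvNonempty, List.filterMap_cons]
    by_cases h : PySem.Str.strip l = ""
    · simpa [h, pvNonempty] using ih
    · by_cases hs : PySem.Str.startswith (PySem.Str.strip l) "#" <;>
        simp [h, pvLoopA_some, pvNonempty]

theorem pvLines_eq (t : String) :
    pvLines t = ((splitN (normAll t.toList)).1 :: (splitN (normAll t.toList)).2).map String.ofList := by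
  unfold pvLines
  rw [PySem.Str.replace, PySem.Str.replace]
  rw [show ("\r\n" : String).toList = ['\r','\n'] from rfl,
      show ("\r" : String).toList = ['\r'] from rfl,
      show ("\n" : String).toList = ['\n'] from rfl]
  rw [replace_rn, String.toList_ofList, replace_r, map_repl1]
  rw [PySem.Str.split?]
  rw [String.toList_ofList, show ("\n" : String).toList = ['\n'] from rfl]
  rw [PySem.Chars.split?]
  simp only [List.isEmpty_cons, Bool.false_eq_true, not_false_iff, if_neg]
  rw [splitOn_n]
  rfl

theorem pvNonempty_map (l : List (List Char)) :
    pvNonempty (l.map String.ofList) = (NEsegs l).map String.ofList := by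
  induction l with
  | nil => simp [pvNonempty, NEsegs]
  | cons a r ih =>
    rw [List.map_cons, NEsegs_cons]
    simp only [pvNonempty, List.filterMap_cons]
    have hstrip : PySem.Str.strip (String.ofList a) = String.ofList (PySem.Chars.strip a) := by
      rw [PySem.Str.strip, String.toList_ofList]
    by_cases hs : PySem.Chars.strip a = []
    · simp only [hstrip, hs]
      simp only [show (String.ofList [] : String) = "" from rfl]
      simpa [pvNonempty, List.filterMap_map, Function.comp] using ih
    · have hne : String.ofList (PySem.Chars.strip a) ≠ "" := by
        intro hh
        apply hs
        have := congrArg String.toList hh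
        simpa using this
      simp only [hstrip, if_neg hne]
      rw [if_neg hs]
      simp only [List.map_cons]
      refine congrArg _ ?_
      simpa [pvNonempty, List.filterMap_map, Function.comp] using ih

theorem NE_norm (cs : List Char) :
    NEsegs ((splitN (normAll cs)).1 :: (splitN (normAll cs)).2)
      = NEsegs ((splitRN cs).1 :: (splitRN cs).2) := by
  rw [NEsegs_cons, NEsegs_cons, (segs_rel cs).1, (segs_rel cs).2]

theorem scanB_run (cs : List Char) :
    scanB (cs ++ ['\n']) [] none none
      = fill none none (NEsegs ((splitRN cs).1 :: (splitRN cs).2)) := by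
  rw [scanB_eq (cs ++ ['\n']) [] none none (by simp)]
  rw [List.nil_append]
  rw [show ((splitRN (cs ++ ['\n'])).1 :: (splitRN (cs ++ ['\n'])).2).dropLast
      = (splitRN cs).1 :: (splitRN cs).2 by
    rw [splitRN_append_newline cs]
    rw [show (splitRN cs).1 :: (splitRN cs).2 ++ [[]]
        = ((splitRN cs).1 :: (splitRN cs).2) ++ [[]] from rfl]
    rw [List.dropLast_concat]]

theorem ofList_ne_empty_iff (x : List Char) : (String.ofList x ≠ "") ↔ x ≠ [] := by
  constructor
  · intro h hx; subst hx; exact h rfl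
  · intro h hh
    exact h (by simpa using congrArg String.toList hh)

theorem final (ct : String) (idx : Int) :
    summarize_command ct idx = summarize_command_alt ct idx := by
  unfold summarize_command summarize_command_alt
  dsimp only
  rw [pvLoopA_none, pvLines_eq, pvNonempty_map, NE_norm, scanB_run]
  cases hN : NEsegs ((splitRN ct.toList).1 :: (splitRN ct.toList).2) with
  | nil => simp [fill]
  | cons x t =>
    have hsw : PySem.Str.startswith (String.ofList x) "#" = PySem.Chars.startswith x ['#'] := by
      simp
    cases t with
    | nil =>
      simp only [List.map_cons, List.map_nil, fill, hsw]
      by_cases hx : PySem.Chars.startswith x ['#']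
      · simp only [hx, if_pos]
        have hlh : pvLstripHash (String.ofList x) = String.ofList (x.dropWhile (· == '#')) := by
          rw [pvLstripHash, String.toList_ofList]
        have hstrip : PySem.Str.strip (String.ofList (x.dropWhile (· == '#')))
            = String.ofList (PySem.Chars.strip (x.dropWhile (· == '#'))) := by
          rw [PySem.Str.strip, String.toList_ofList]
        simp only [hlh, hstrip, Option.getD_some]
        by_cases hd : PySem.Chars.strip (x.dropWhile (· == '#')) = []
        · simp [hd]
        · have : String.ofList (PySem.Chars.strip (x.dropWhile (· == '#'))) ≠ "" :=
            (ofList_ne_empty_iff _).2 hd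
          simp [hd, this]
      · simp [hx]
    | cons y r =>
      simp only [List.map_cons, fill, fill_full, hsw]
      by_cases hx : PySem.Chars.startswith x ['#']
      · simp only [hx, if_pos]
        have hlh : pvLstripHash (String.ofList x) = String.ofList (x.dropWhile (· == '#')) := by
          rw [pvLstripHash, String.toList_ofList]
        have hstrip : PySem.Str.strip (String.ofList (x.dropWhile (· == '#')))
            = String.ofList (PySem.Chars.strip (x.dropWhile (· == '#'))) := by
          rw [PySem.Str.strip, String.toList_ofList]
        simp only [hlh, hstrip, Option.getD_some]
        by_cases hd : PySem.Chars.strip (x.dropWhile (· == '#')) = []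
        · simp [hd]
        · have : String.ofList (PySem.Chars.strip (x.dropWhile (· == '#'))) ≠ "" :=
            (ofList_ne_empty_iff _).2 hd
          simp [hd, this]
      · simp [hx]

-- ===== VERDICT (by name: the statement is the Claim_ definition above) =====
theorem summarize_command_spec : Claim_equal_summarize_command := by
  intro command_text index _
  unfold Spec_summarize_command
  exact final command_text index
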